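-- pv_equiv track=rewrite | github.com/lilellia/pixielf.github.io | mka/_build_data.py | htmlify_char_quest
-- ===== SOURCE A (Python) =====
-- def romanize(n):
--     def fmt(k, one: str, five: str, ten: str):
--         lookup = [
--             '', f'{one}', f'{one}{one}', f'{one}{one}{one}', f'{one}{five}',
--             f'{five}', f'{five}{one}', f'{five}{one}{one}', f'{five}{one}{one}{one}', f'{one}{ten}'
--         ]
--         return lookup[k]
--
--     roman = ''
--     while n >= 1000:
--         roman += 'M'
--         n -= 1000
--
--     hundreds, n = divmod(n, 100)
--     roman += fmt(hundreds, one='C', five='D', ten='M')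
--
--     tens, n = divmod(n, 10)
--     roman += fmt(tens, one='X', five='L', ten='C')
--     roman += fmt(n, one='I', five='V', ten='X')
--
--     return roman
--
-- def htmlify_char_quest(episode, quest):
--     def _paragraphize(text):
--         if '\n' in text:
--             return '\n'.join(
--                 f'<p>{para}</p>'
--                 for para in text.split('\n')
--             )
--         return text
--
--     available = quest.get('available', '')
--     hook = quest.get('hook', '')
--     description = quest.get('description', '')
--     story = quest.get('story', '')
--     return f'''<tr>
--                 <td style="width: 5%;">{romanize(episode)}</td>
--                 <td style="width: 5%;">{available}</td>
--                 <td style="width: 10%;">{hook}</td>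
--                 <td style="width: 40%;">{_paragraphize(description)}</td>
--                 <td style="width: 40%;">{_paragraphize(story)}</td>
--             </tr>'''
-- ===== SOURCE B (Python) =====
-- ROMAN_TABLE = [
--     (1000, 'M'), (900, 'CM'), (500, 'D'), (400, 'CD'),
--     (100, 'C'), (90, 'XC'), (50, 'L'), (40, 'XL'),
--     (10, 'X'), (9, 'IX'), (5, 'V'), (4, 'IV'), (1, 'I'),
-- ]
--
--
-- def romanize(n):
--     parts = []
--     for value, symbol in ROMAN_TABLE:
--         count, n = divmod(n, value)
--         parts.append(symbol * count)
--     return ''.join(parts)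
--
--
-- def htmlify_char_quest(episode, quest):
--     def _paragraphize(text):
--         if '\n' not in text:
--             return text
--         return '\n'.join(f'<p>{para}</p>' for para in text.split('\n'))
--
--     cells = [
--         (5, romanize(episode)),
--         (5, quest.get('available', '')),
--         (10, quest.get('hook', '')),
--         (40, _paragraphize(quest.get('description', ''))),
--         (40, _paragraphize(quest.get('story', ''))),
--     ]
--     body = '\n'.join(
--         f'                <td style="width: {width}%;">{content}</td>'
--         for width, content in cells
--     )
--     return f'<tr>\n{body}\n            </tr>'
-- ===== Notes on version B (the rewrite author's own statement) =====
-- stated objective: idiomatic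
-- what changed: romanize is rebuilt as the standard single ordered (value,symbol) table with one divmod-and-repeat pass per entry instead of a thousands while-loop plus a per-column lookup-array helper, and the HTML row is assembled by joining (width, content) cells instead of one interpolated template literal.
import Mathlib
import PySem

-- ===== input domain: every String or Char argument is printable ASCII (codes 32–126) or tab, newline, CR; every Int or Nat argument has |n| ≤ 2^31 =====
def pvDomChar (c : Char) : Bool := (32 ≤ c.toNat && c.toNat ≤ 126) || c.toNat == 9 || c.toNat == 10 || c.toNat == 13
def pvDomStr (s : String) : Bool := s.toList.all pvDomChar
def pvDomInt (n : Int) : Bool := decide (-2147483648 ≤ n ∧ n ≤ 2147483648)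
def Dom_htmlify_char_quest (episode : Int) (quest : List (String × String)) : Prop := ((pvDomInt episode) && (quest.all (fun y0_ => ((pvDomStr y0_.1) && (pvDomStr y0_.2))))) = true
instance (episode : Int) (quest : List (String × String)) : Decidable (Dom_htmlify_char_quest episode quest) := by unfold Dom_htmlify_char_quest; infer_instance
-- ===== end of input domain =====

-- B rebuilds the roman numeral with a single ordered (value,symbol) divmod table and assembles the row by joining width/content cells; objective: idiomatic.


-- ===== PORT A =====
-- fmt(k, one, five, ten): lookup[k]; a k outside [-10, 9] is an IndexError, excluded by Pre_
def pvFmtA (k : Int) (one five ten : String) : String :=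
  let lookup : List String := ["", one, one ++ one, one ++ one ++ one, one ++ five,
    five, five ++ one, five ++ one ++ one, five ++ one ++ one ++ one, one ++ ten]
  PySem.List.pyGetD lookup k ""

-- the 'while n >= 1000' loop; the fuel n.toNat only makes the recursion total (it bounds the
-- iteration count, since every iteration subtracts 1000 ≥ 1)
def pvRomanWhile (fuel : Nat) (n : Int) (roman : String) : String × Int :=
  match fuel with
  | 0 => (roman, n)
  | fuel + 1 => if 1000 ≤ n then pvRomanWhile fuel (n - 1000) (roman ++ "M") else (roman, n)

def pvRomanize (n0 : Int) : String :=
  let p := pvRomanWhile n0.toNat n0 ""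
  let roman := p.1
  let n := p.2
  let hundreds := PySem.Int.floordiv n 100
  let n := PySem.Int.mod n 100
  let roman := roman ++ pvFmtA hundreds "C" "D" "M"
  let tens := PySem.Int.floordiv n 10
  let n := PySem.Int.mod n 10
  let roman := roman ++ pvFmtA tens "X" "L" "C"
  roman ++ pvFmtA n "I" "V" "X"

def pvParagraphize (text : String) : String :=
  if PySem.Str.isIn "\n" text then
    PySem.Str.join "\n" (((PySem.Str.split? text "\n").getD []).map (fun para => "<p>" ++ para ++ "</p>"))
  else text

def htmlify_char_quest (episode : Int) (quest : List (String × String)) : String :=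
  let available := PySem.Dict.getD ⟨quest⟩ "available" ""
  let hook := PySem.Dict.getD ⟨quest⟩ "hook" ""
  let description := PySem.Dict.getD ⟨quest⟩ "description" ""
  let story := PySem.Dict.getD ⟨quest⟩ "story" ""
  "<tr>\n                <td style=\"width: 5%;\">" ++ pvRomanize episode ++
  "</td>\n                <td style=\"width: 5%;\">" ++ available ++
  "</td>\n                <td style=\"width: 10%;\">" ++ hook ++
  "</td>\n                <td style=\"width: 40%;\">" ++ pvParagraphize description ++
  "</td>\n                <td style=\"width: 40%;\">" ++ pvParagraphize story ++
  "</td>\n            </tr>"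

-- ===== PORT B =====
def pvRomanTable : List (Int × String) :=
  [(1000, "M"), (900, "CM"), (500, "D"), (400, "CD"), (100, "C"), (90, "XC"),
   (50, "L"), (40, "XL"), (10, "X"), (9, "IX"), (5, "V"), (4, "IV"), (1, "I")]

-- loop body: count, n = divmod(n, value); parts.append(symbol * count)
def pvRomStep (st : List String × Int) (vs : Int × String) : List String × Int :=
  (st.1 ++ [String.ofList (PySem.List.pyRepeat vs.2.toList (PySem.Int.floordiv st.2 vs.1))],
   PySem.Int.mod st.2 vs.1)

def pvRomanizeAlt (n : Int) : String :=
  PySem.Str.join "" (pvRomanTable.foldl pvRomStep ([], n)).1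

def pvParagraphizeAlt (text : String) : String :=
  if PySem.Str.isIn "\n" text = false then text
  else PySem.Str.join "\n" (((PySem.Str.split? text "\n").getD []).map (fun para => "<p>" ++ para ++ "</p>"))

def htmlify_char_quest_alt (episode : Int) (quest : List (String × String)) : String :=
  let cells : List (Int × String) := [
    (5, pvRomanizeAlt episode),
    (5, PySem.Dict.getD ⟨quest⟩ "available" ""),
    (10, PySem.Dict.getD ⟨quest⟩ "hook" ""),
    (40, pvParagraphizeAlt (PySem.Dict.getD ⟨quest⟩ "description" "")),
    (40, pvParagraphizeAlt (PySem.Dict.getD ⟨quest⟩ "story" ""))]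
  let body := PySem.Str.join "\n" (cells.map (fun wc =>
    "                <td style=\"width: " ++ PySem.Int.toStr wc.1 ++ "%;\">" ++ wc.2 ++ "</td>"))
  "<tr>\n" ++ body ++ "\n            </tr>"

-- ===== PRECONDITION & SPEC =====
-- Pre_ excludes exactly episode ≤ -1001, where A computes hundreds = episode // 100 ≤ -11 and lookup[hundreds] raises IndexError.
def Pre_htmlify_char_quest (episode : Int) (quest : List (String × String)) : Prop := -1000 ≤ episode
instance (episode : Int) (quest : List (String × String)) : Decidable (Pre_htmlify_char_quest episode quest) := by unfold Pre_htmlify_char_quest; infer_instance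
def pvWitness_htmlify_char_quest : Int × (List (String × String)) := (7, [("hook", "meet")])

def Spec_htmlify_char_quest (episode : Int) (quest : List (String × String)) (out : String) : Prop := out = htmlify_char_quest_alt episode quest
instance (episode : Int) (quest : List (String × String)) (out : String) : Decidable (Spec_htmlify_char_quest episode quest out) := by unfold Spec_htmlify_char_quest; infer_instance

-- ===== CLAIM (what is proved, stated in full; the proofs are below) =====
def Claim_equal_htmlify_char_quest : Prop := ∀ (episode : Int) (quest : List (String × String)), Dom_htmlify_char_quest episode quest → Pre_htmlify_char_quest episode quest → Spec_htmlify_char_quest episode quest (htmlify_char_quest episode quest)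

-- ===== LEMMAS AND PROOFS =====

-- the while loop does nothing when n < 1000, whatever the fuel
theorem pvRomanWhile_skip (f : Nat) (n : Int) (roman : String) (h : n < 1000) :
    pvRomanWhile f n roman = (roman, n) := by
  cases f <;> simp [pvRomanWhile, show ¬ (1000 ≤ n) by omega]

-- the while-loop result does not depend on the fuel once it covers the iteration count
theorem pvRomanWhile_fuel (f g : Nat) (n : Int) (roman : String)
    (hf : n.toNat ≤ 1000 * f + 999) (hg : n.toNat ≤ 1000 * g + 999) :
    pvRomanWhile f n roman = pvRomanWhile g n roman := by
  induction f generalizing g n roman with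
  | zero => rw [pvRomanWhile_skip 0 n roman (by omega), pvRomanWhile_skip g n roman (by omega)]
  | succ f ih =>
    by_cases h : 1000 ≤ n
    · cases g with
      | zero => omega
      | succ g =>
        simp only [pvRomanWhile, if_pos h]
        exact ih g (n - 1000) (roman ++ "M") (by omega) (by omega)
    · rw [pvRomanWhile_skip _ n roman (by omega), pvRomanWhile_skip g n roman (by omega)]

-- accumulator property of the while loop
theorem pvRomanWhile_acc (f : Nat) (n : Int) (acc : String) :
    pvRomanWhile f n acc = (acc ++ (pvRomanWhile f n "").1, (pvRomanWhile f n "").2) := by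
  induction f generalizing n acc with
  | zero => simp [pvRomanWhile]
  | succ f ih =>
    by_cases h : 1000 ≤ n
    · simp only [pvRomanWhile, if_pos h]
      rw [ih (n - 1000) (acc ++ "M"), ih (n - 1000) ("" ++ "M")]
      refine Prod.ext ?_ rfl
      rw [← String.toList_inj]
      simp
    · simp [pvRomanWhile, h]

theorem romA_step (n : Int) (h : 1000 ≤ n) :
    (pvRomanize n).toList = 'M' :: (pvRomanize (n - 1000)).toList := by
  unfold pvRomanize
  rw [pvRomanWhile_fuel n.toNat ((n - 1000).toNat + 1) n "" (by omega) (by omega)]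
  simp only [pvRomanWhile, if_pos h]
  rw [pvRomanWhile_acc ((n - 1000).toNat) (n - 1000) ("" ++ "M")]
  simp

-- shifting a negative input up by 1000 does not change A's output (negative lookup indices wrap)
theorem romA_shift (n : Int) (h1 : -1000 ≤ n) (h2 : n < 0) :
    pvRomanize n = pvRomanize (n + 1000) := by
  unfold pvRomanize
  rw [pvRomanWhile_skip _ n "" (by omega), pvRomanWhile_skip _ (n + 1000) "" (by omega)]
  simp only
  have hmod : PySem.Int.mod n 100 = PySem.Int.mod (n + 1000) 100 := by
    simp only [PySem.Int.mod, Int.fmod_eq_emod]; omega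
  have hdiv : PySem.Int.floordiv (n + 1000) 100 = PySem.Int.floordiv n 100 + 10 := by
    simp only [PySem.Int.floordiv, Int.fdiv_eq_ediv]; omega
  have hbounds : -10 ≤ PySem.Int.floordiv n 100 ∧ PySem.Int.floordiv n 100 ≤ -1 := by
    simp only [PySem.Int.floordiv, Int.fdiv_eq_ediv]; omega
  rw [hmod, hdiv]
  have hfmt : pvFmtA (PySem.Int.floordiv n 100) "C" "D" "M"
      = pvFmtA (PySem.Int.floordiv n 100 + 10) "C" "D" "M" := by
    obtain ⟨hb1, hb2⟩ := hbounds
    set k := PySem.Int.floordiv n 100 with hk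
    interval_cases k <;> decide
  rw [hfmt]

-- the fold appends to the parts accumulator
theorem foldl_romStep_acc (l : List (Int × String)) (parts : List String) (m : Int) :
    l.foldl pvRomStep (parts, m) =
      (parts ++ (l.foldl pvRomStep ([], m)).1, (l.foldl pvRomStep ([], m)).2) := by
  induction l generalizing parts m with
  | nil => simp
  | cons e l ih =>
    simp only [List.foldl_cons]
    rcases he : pvRomStep ([], m) e with ⟨p1, m1⟩
    have he' : pvRomStep (parts, m) e = (parts ++ p1, m1) := by
      simp only [pvRomStep, Prod.mk.injEq] at he ⊢
      exact ⟨by rw [← he.1]; simp, he.2⟩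
    rw [he', ih (parts ++ p1) m1, ih p1 m1, List.append_assoc]

theorem chars_join_nilsep : ∀ xs : List (List Char), PySem.Chars.join [] xs = xs.flatten
  | [] => by simp [PySem.Chars.join_nil]
  | [x] => by simp [PySem.Chars.join_singleton]
  | x :: y :: rest => by
      rw [PySem.Chars.join_cons_cons]
      simp [chars_join_nilsep (y :: rest)]

theorem romAlt_unfold (n : Int) :
    (pvRomanizeAlt n).toList =
      (List.replicate (PySem.Int.floordiv n 1000).toNat 'M')
        ++ ((pvRomanTable.tail.foldl pvRomStep ([], PySem.Int.mod n 1000)).1.map String.toList).flatten := by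
  unfold pvRomanizeAlt
  rw [show pvRomanTable = (1000, "M") :: pvRomanTable.tail from rfl, List.foldl_cons]
  rw [show pvRomStep ([], n) (1000, "M")
        = ([String.ofList (List.replicate (PySem.Int.floordiv n 1000).toNat 'M')], PySem.Int.mod n 1000) from by
      simp [pvRomStep, PySem.List.pyRepeat_singleton]]
  rw [foldl_romStep_acc _ [String.ofList (List.replicate (PySem.Int.floordiv n 1000).toNat 'M')] _]
  rw [PySem.Str.toList_join]
  simp [chars_join_nilsep]

theorem romAlt_step (n : Int) (h : 1000 ≤ n) :
    (pvRomanizeAlt n).toList = 'M' :: (pvRomanizeAlt (n - 1000)).toList := by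
  rw [romAlt_unfold n, romAlt_unfold (n - 1000)]
  have hmod : PySem.Int.mod (n - 1000) 1000 = PySem.Int.mod n 1000 := by
    simp only [PySem.Int.mod, Int.fmod_eq_emod]; omega
  have hdiv : (PySem.Int.floordiv n 1000).toNat = (PySem.Int.floordiv (n - 1000) 1000).toNat + 1 := by
    simp only [PySem.Int.floordiv, Int.fdiv_eq_ediv]; omega
  rw [hmod, hdiv, List.replicate_succ]
  simp

-- shifting a negative input up by 1000 does not change B's output ('M' * count is empty for count ≤ 0)
theorem romAlt_shift (n : Int) (h1 : -1000 ≤ n) (h2 : n < 0) :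
    pvRomanizeAlt n = pvRomanizeAlt (n + 1000) := by
  rw [← String.toList_inj, romAlt_unfold n, romAlt_unfold (n + 1000)]
  have hmod : PySem.Int.mod n 1000 = PySem.Int.mod (n + 1000) 1000 := by
    simp only [PySem.Int.mod, Int.fmod_eq_emod]; omega
  have hq1 : (PySem.Int.floordiv n 1000).toNat = 0 := by
    simp only [PySem.Int.floordiv, Int.fdiv_eq_ediv]; omega
  have hq2 : (PySem.Int.floordiv (n + 1000) 1000).toNat = 0 := by
    simp only [PySem.Int.floordiv, Int.fdiv_eq_ediv]; omega
  rw [hmod, hq1, hq2]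

set_option maxRecDepth 1000000 in
set_option maxHeartbeats 4000000 in
theorem roman_base : ∀ k : Fin 1000,
    pvRomanize (k.val : Int) = pvRomanizeAlt (k.val : Int) := by
  decide

theorem roman_eq (n : Int) (h : -1000 ≤ n) : pvRomanize n = pvRomanizeAlt n := by
  by_cases h1000 : 1000 ≤ n
  · rw [← String.toList_inj, romA_step n h1000, romAlt_step n h1000,
        roman_eq (n - 1000) (by omega)]
  · by_cases hneg : n < 0
    · rw [romA_shift n h hneg, romAlt_shift n h hneg]
      have hc : ((n + 1000).toNat : Int) = n + 1000 := Int.toNat_of_nonneg (by omega)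
      have := roman_base ⟨(n + 1000).toNat, by omega⟩
      simpa [hc] using this
    · have hc : ((n.toNat : Int)) = n := Int.toNat_of_nonneg (by omega)
      have := roman_base ⟨n.toNat, by omega⟩
      simpa [hc] using this
termination_by n.toNat
decreasing_by omega

theorem paragraphize_eq (t : String) : pvParagraphize t = pvParagraphizeAlt t := by
  unfold pvParagraphize pvParagraphizeAlt
  cases h : PySem.Str.isIn "\n" t <;> simp [h]

-- ===== VERDICT (by name: the statement is the Claim_ definition above) =====
set_option maxRecDepth 40000 in
theorem htmlify_char_quest_spec : Claim_equal_htmlify_char_quest := by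
  intro episode quest _ hpre
  unfold Spec_htmlify_char_quest
  simp only [htmlify_char_quest, htmlify_char_quest_alt]
  rw [roman_eq episode hpre]
  simp only [paragraphize_eq, List.map_cons, List.map_nil]
  rw [← String.toList_inj]
  simp [PySem.Str.toList_join, PySem.Chars.join_cons_cons, PySem.Chars.join_singleton,
        show PySem.Int.toStr 5 = "5" from by decide,
        show PySem.Int.toStr 10 = "10" from by decide,
        show PySem.Int.toStr 40 = "40" from by decide]
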